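-- pv_equiv track=rewrite | github.com/tomvit/ja2mqtt | ja2mqtt/components/serial.py | encode_prfstate
-- ===== SOURCE A (Python) =====
-- def encode_prfstate(prf, prf_state_bits=24):
--     """
--     Encode prfstate from the prf state object. This is an inverse funtion to decode_prfstate,
--     i.e. it must hold that `encode_prfstate(decode_prfstate(X)) == X`
--     """
--     b = "".zfill(prf_state_bits)
--     for p in prf.keys():
--         if prf[p] == "ON":
--             index = int(p)
--             b = b[:index] + "1" + b[index + 1 :]
--     r = ""
--     for x in range(len(b) // 8):
--         h = hex(int(b[x * 8 : x * 8 + 8][::-1], 2))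
--         h2 = h[2:].upper().zfill(2)
--         r += h2
--     return r
-- ===== SOURCE B (Python) =====
-- def encode_prfstate(prf, prf_state_bits=24):
--     num_bytes = prf_state_bits // 8
--     vals = [0] * num_bytes
--     for p, v in prf.items():
--         if v == "ON":
--             idx = int(p)
--             if 0 <= idx < num_bytes * 8:
--                 vals[idx // 8] |= 1 << (idx % 8)
--     return "".join("{:02X}".format(x) for x in vals)
-- ===== Notes on version B (the rewrite author's own statement) =====
-- stated objective: simpler
-- what changed: B keeps one small integer per output byte and ORs 2^(idx%8) into vals[idx//8] in a single pass over the dict, then formats each byte with '{:02X}', instead of A's repeated string-slicing into a mutable '0'/'1' text, per-chunk reversal and re-parsing with int(_,2) and hex().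
-- outside the precondition, e.g. on encode_prfstate({'-1': 'ON'}, 24): A returns '000080000000', B returns '000000'; on encode_prfstate({'100': 'ON'}, 24): A returns '000000', B returns '000000'
import Mathlib
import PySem

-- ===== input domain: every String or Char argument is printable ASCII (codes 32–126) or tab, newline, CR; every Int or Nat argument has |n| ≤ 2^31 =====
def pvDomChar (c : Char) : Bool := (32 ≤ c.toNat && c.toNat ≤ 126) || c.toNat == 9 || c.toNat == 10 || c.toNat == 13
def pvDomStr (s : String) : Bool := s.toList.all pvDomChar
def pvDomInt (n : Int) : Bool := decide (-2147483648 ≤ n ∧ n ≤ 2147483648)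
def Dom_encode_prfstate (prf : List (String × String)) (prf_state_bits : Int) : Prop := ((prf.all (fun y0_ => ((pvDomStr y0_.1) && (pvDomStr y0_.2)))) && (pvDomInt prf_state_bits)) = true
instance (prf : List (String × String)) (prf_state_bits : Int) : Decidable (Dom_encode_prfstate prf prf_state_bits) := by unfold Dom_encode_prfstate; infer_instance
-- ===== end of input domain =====

-- B keeps one integer per output byte and ORs bits into it in one pass, replacing A's
-- string-slice bit mutation, per-chunk reversal, int(_,2) re-parse and hex() formatting (objective: simpler).

-- ===== PORT A =====
-- hexDigitA d = the d-th lowercase hex digit (exact for d < 16), used by pyHex = Python's hex()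
def hexDigitA (d : Nat) : Char := if d < 10 then Char.ofNat (48 + d) else Char.ofNat (87 + d)

-- hexCharsA n = lowercase hex digits of n, most significant first (exact for the values hex() prints);
-- structural fuel recursion (fuel n+1 is ample: the digit count is at most n+1) so the kernel can evaluate it
def hexAuxA : Nat → Nat → List Char
  | 0, _ => []
  | fuel + 1, n => if n < 16 then [hexDigitA n] else hexAuxA fuel (n / 16) ++ [hexDigitA (n % 16)]

def hexCharsA (n : Nat) : List Char := hexAuxA (n + 1) n

-- pyHex v = Python hex(v) as a char list ("0x…", '-' first for negatives); hand port, exact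
def pyHex (v : Int) : List Char :=
  if v < 0 then '-' :: '0' :: 'x' :: hexCharsA v.natAbs else '0' :: 'x' :: hexCharsA v.toNat

def encode_prfstate (prf : List (String × String)) (prf_state_bits : Int) : String :=
  -- b = "".zfill(prf_state_bits)
  let b0 := PySem.Chars.zfill [] prf_state_bits
  -- for p in prf.keys(): if prf[p] == "ON": b = b[:index] + "1" + b[index+1:]
  -- (prf is a dict: keys are distinct — Pre_ — so iterating the pairs is iterating keys)
  let b := prf.foldl (fun b p =>
    if p.2 == "ON" then
      match PySem.Int.ofStr? p.1 with                     -- index = int(p)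
      | some index =>
          PySem.List.slice b none (some index) ++ '1' :: PySem.List.slice b (some (index + 1)) none
      | none => b                                          -- int(p) raises ValueError; excluded by Pre_
    else b) b0
  -- for x in range(len(b) // 8): …
  let r := (PySem.List.pyRange 0 (PySem.Int.floordiv (PySem.List.len b) 8) 1).foldl (fun r x =>
    let chunk := PySem.List.slice b (some (x * 8)) (some (x * 8 + 8))
    let rev := (PySem.List.slice? chunk none none (-1)).getD []   -- chunk[::-1]; step -1 ≠ 0: never none
    let v := (PySem.Int.ofCharsBase? rev 2).getD 0                -- int(_, 2); never none: 8 binary digits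
    let h := pyHex v                                              -- h = hex(v)
    let h2 := PySem.Chars.zfill (PySem.Chars.upper (PySem.List.slice h (some 2) none)) 2   -- h[2:].upper().zfill(2)
    r ++ h2) []
  String.ofList r

-- ===== PORT B =====
-- hexDigitB d = the d-th uppercase hex digit (exact for d < 16)
def hexDigitB (d : Nat) : Char := if d < 10 then Char.ofNat (48 + d) else Char.ofNat (55 + d)

-- hexCharsB n = uppercase hex digits of n, most significant first (same fuel scheme as hexAuxA)
def hexAuxB : Nat → Nat → List Char
  | 0, _ => []
  | fuel + 1, n => if n < 16 then [hexDigitB n] else hexAuxB fuel (n / 16) ++ [hexDigitB (n % 16)]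

def hexCharsB (n : Nat) : List Char := hexAuxB (n + 1) n

-- fmt02X x = "{:02X}".format(x); exact for 0 ≤ x (the only values B formats)
def fmt02X (x : Int) : List Char := PySem.Chars.zfill (hexCharsB x.toNat) 2

def encode_prfstate_alt (prf : List (String × String)) (prf_state_bits : Int) : String :=
  let numBytes := PySem.Int.floordiv prf_state_bits 8           -- num_bytes = prf_state_bits // 8
  let vals0 : List Int := List.replicate numBytes.toNat 0       -- vals = [0] * num_bytes  ([0]*k = [] for k ≤ 0)
  let vals := prf.foldl (fun vals p =>
    if p.2 == "ON" then
      match PySem.Int.ofStr? p.1 with                           -- idx = int(p)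
      | some idx =>
          if 0 ≤ idx ∧ idx < numBytes * 8 then                  -- if 0 <= idx < num_bytes * 8:
            PySem.List.pySetD vals (PySem.Int.floordiv idx 8)   --   vals[idx // 8] |= 1 << (idx % 8)
              (PySem.Int.bor (PySem.List.pyGetD vals (PySem.Int.floordiv idx 8) 0)
                ((1 : Int) <<< (PySem.Int.mod idx 8).toNat))    -- shift count = idx % 8 ≥ 0: toNat exact
          else vals
      | none => vals                                            -- int(p) raises ValueError; excluded by Pre_
    else vals) vals0
  String.ofList (vals.map fmt02X).flatten                       -- "".join("{:02X}".format(x) for x in vals)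

-- ===== PRECONDITION & SPEC =====
-- Pre_ excludes: association lists with duplicate keys (a Python dict cannot hold them); ON-valued keys that
-- do not parse as an int (A raises ValueError there); and ON-valued keys whose integer lies outside
-- [0, prf_state_bits), where A's slice arithmetic wraps to the string end or silently grows the bit string —
-- the realistic encoder domain is bit indices inside the state.
def Pre_encode_prfstate (prf : List (String × String)) (prf_state_bits : Int) : Prop :=
  (prf.map Prod.fst).Nodup ∧
  ∀ p ∈ prf, p.2 = "ON" →
    (PySem.Int.ofStr? p.1).any (fun i => decide (0 ≤ i ∧ i < prf_state_bits)) = true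
instance (prf : List (String × String)) (prf_state_bits : Int) : Decidable (Pre_encode_prfstate prf prf_state_bits) := by unfold Pre_encode_prfstate; infer_instance

def pvWitness_encode_prfstate : (List (String × String)) × Int := ([("0", "ON"), ("10", "ON"), ("3", "OFF")], 24)

def Spec_encode_prfstate (prf : List (String × String)) (prf_state_bits : Int) (out : String) : Prop := out = encode_prfstate_alt prf prf_state_bits
instance (prf : List (String × String)) (prf_state_bits : Int) (out : String) : Decidable (Spec_encode_prfstate prf prf_state_bits out) := by unfold Spec_encode_prfstate; infer_instance

-- ===== CLAIM (what is proved, stated in full; the proofs are below) =====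
def Claim_equal_encode_prfstate : Prop := ∀ (prf : List (String × String)) (prf_state_bits : Int), Dom_encode_prfstate prf prf_state_bits → Pre_encode_prfstate prf prf_state_bits → Spec_encode_prfstate prf prf_state_bits (encode_prfstate prf prf_state_bits)

-- ===== LEMMAS AND PROOFS =====

-- bval cs = the integer value of a chunk cs read least-significant-bit-first ('1' = set bit)
def bval : List Char → Nat
  | [] => 0
  | c :: cs => (if c = '1' then 1 else 0) + 2 * bval cs

-- the j-th 8-bit chunk of the bit string
def chunkOf (b : List Char) (j : Nat) : List Char := (b.drop (8 * j)).take 8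

-- an 8-chunk with the bits of the byte v ('1' where the bit is set)
def reprV (v : Nat) : List Char := (List.range 8).map (fun k => if v.testBit k then '1' else '0')

theorem bval_lt (cs : List Char) : bval cs < 2 ^ cs.length := by
  induction cs with
  | nil => simp [bval]
  | cons c cs ih => simp only [bval, List.length_cons, pow_succ]; split_ifs <;> omega

theorem bval_bit (c : Char) (cs : List Char) :
    bval (c :: cs) = Nat.bit (decide (c = '1')) (bval cs) := by
  rw [Nat.bit_val]; by_cases h : c = '1' <;> simp [bval, h] <;> omega

theorem testBit_bval (cs : List Char) (t : Nat) :
    (bval cs).testBit t = decide (cs.getD t '0' = '1') := by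
  induction cs generalizing t with
  | nil => simp [bval]
  | cons c cs ih =>
    cases t with
    | zero => rw [bval_bit, Nat.testBit_bit_zero]; simp
    | succ t => rw [bval_bit, Nat.testBit_bit_succ, ih]; simp

theorem bval_set (cs : List Char) (m : Nat) (hm : m < cs.length) :
    bval cs ||| 2 ^ m = bval (cs.set m '1') := by
  apply Nat.eq_of_testBit_eq
  intro t
  rw [Nat.testBit_or, testBit_bval, testBit_bval, Nat.testBit_two_pow]
  by_cases ht : t = m
  · subst ht; simp [List.getD, hm]
  · rw [decide_eq_false (by omega : ¬ m = t)]
    simp [List.getD, List.getElem?_set_ne (by omega : m ≠ t)]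

theorem mem_chunkOf (b : List Char) (j : Nat) (c : Char) (h : c ∈ chunkOf b j) : c ∈ b :=
  List.mem_of_mem_drop (List.mem_of_mem_take h)

theorem length_chunkOf (b : List Char) (j : Nat) (h : 8 * j + 8 ≤ b.length) :
    (chunkOf b j).length = 8 := by
  simp [chunkOf]; omega

theorem chunkOf_set (b : List Char) (m : Nat) (v : Char) (j : Nat) :
    chunkOf (b.set m v) j =
      if 8 * j ≤ m ∧ m < 8 * j + 8 then (chunkOf b j).set (m - 8 * j) v else chunkOf b j := by
  apply List.ext_getElem
  · split_ifs <;> simp [chunkOf]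
  · intro t h1 h2
    have htb : 8 * j + t < b.length := by simp [chunkOf] at h1; omega
    have ht8 : t < 8 := by simp [chunkOf] at h1; omega
    split_ifs with hc
    · simp only [chunkOf, List.getElem_take, List.getElem_drop, List.getElem_set]
      split_ifs <;> first | rfl | omega
    · simp only [chunkOf, List.getElem_take, List.getElem_drop, List.getElem_set]
      split_ifs with h3
      · omega
      · rfl

theorem bval_replicate0 (k : Nat) : bval (List.replicate k '0') = 0 := by
  induction k with
  | zero => simp [bval]
  | succ k ih => simp [List.replicate_succ, bval, ih]

theorem zfill_nil (n : Int) : PySem.Chars.zfill [] n = List.replicate n.toNat '0' := by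
  simp [PySem.Chars.zfill]

-- reading the reversed chunk in base 2 and hex-formatting it as A does equals B's "{:02X}" of its value
set_option maxRecDepth 40000 in
theorem hex_bridge : ∀ v : Nat, v < 256 →
    PySem.Chars.zfill (PySem.Chars.upper (PySem.List.slice
        (pyHex ((PySem.Int.ofCharsBase? (reprV v).reverse 2).getD 0)) (some 2) none)) 2
      = fmt02X ((v : Nat) : Int) := by
  decide

theorem repr_of_binary (cs : List Char) (h8 : cs.length = 8)
    (hb : ∀ c ∈ cs, c = '0' ∨ c = '1') :
    cs = reprV (bval cs) := by
  apply List.ext_getElem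
  · simp [reprV, h8]
  · intro k hk1 hk2
    simp only [reprV, List.getElem_map, List.getElem_range]
    rw [testBit_bval]
    have hg : cs.getD k '0' = cs[k] := by
      simp [List.getD_eq_getElem?_getD, List.getElem?_eq_getElem hk1]
    rw [hg]
    rcases hb cs[k] (List.getElem_mem hk1) with h | h <;> simp [h]

theorem byte_eq (cs : List Char) (h8 : cs.length = 8)
    (hb : ∀ c ∈ cs, c = '0' ∨ c = '1') :
    PySem.Chars.zfill (PySem.Chars.upper (PySem.List.slice
        (pyHex ((PySem.Int.ofCharsBase? cs.reverse 2).getD 0)) (some 2) none)) 2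
      = fmt02X ((bval cs : Nat) : Int) := by
  have hv : bval cs < 256 := by have := bval_lt cs; rw [h8] at this; exact this
  conv_lhs => rw [repr_of_binary cs h8 hb]
  exact hex_bridge (bval cs) hv

-- the loop invariant tying A's bit string to B's byte values
def EncInv (N : Nat) (b : List Char) (vals : List Int) : Prop :=
  b.length = N ∧ (∀ c ∈ b, c = '0' ∨ c = '1') ∧
  vals = (List.range (N / 8)).map (fun j => ((bval (chunkOf b j) : Nat) : Int))

-- one ON key with in-range index preserves the invariant
theorem step_pres (n : Int) (p : String × String) (b : List Char) (vals : List Int)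
    (hp : p.2 = "ON" →
      (PySem.Int.ofStr? p.1).any (fun i => decide (0 ≤ i ∧ i < n)) = true)
    (h : EncInv n.toNat b vals) :
    EncInv n.toNat
      (if p.2 == "ON" then
        match PySem.Int.ofStr? p.1 with
        | some index =>
            PySem.List.slice b none (some index) ++ '1' :: PySem.List.slice b (some (index + 1)) none
        | none => b
       else b)
      (if p.2 == "ON" then
        match PySem.Int.ofStr? p.1 with
        | some idx =>
            if 0 ≤ idx ∧ idx < (PySem.Int.floordiv n 8) * 8 then
              PySem.List.pySetD vals (PySem.Int.floordiv idx 8)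
                (PySem.Int.bor (PySem.List.pyGetD vals (PySem.Int.floordiv idx 8) 0)
                  ((1 : Int) <<< (PySem.Int.mod idx 8).toNat))
            else vals
        | none => vals
       else vals) := by
  obtain ⟨hlen, hbin, hvals⟩ := h
  by_cases hON : p.2 = "ON"
  case neg =>
    rw [if_neg (by simpa using hON), if_neg (by simpa using hON)]
    exact ⟨hlen, hbin, hvals⟩
  case pos =>
    specialize hp hON
    rw [if_pos (by simpa using hON), if_pos (by simpa using hON)]
    cases hof : PySem.Int.ofStr? p.1 with
    | none => rw [hof] at hp; simp [Option.any] at hp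
    | some i =>
      dsimp only
      rw [hof] at hp
      simp only [Option.any_some, decide_eq_true_eq] at hp
      obtain ⟨hi0, hin⟩ := hp
      have hiN : i.toNat < n.toNat := by omega
      set m := i.toNat with hm
      set N := n.toNat with hN
      -- A's slice update is setting bit m
      have hA : PySem.List.slice b none (some i) ++ '1' :: PySem.List.slice b (some (i + 1)) none
          = b.set m '1' := by
        rw [show PySem.List.slice b none (some i) = b.take i.toNat from
            PySem.List.slice_to b (by omega),
          show PySem.List.slice b (some (i + 1)) none = b.drop (i + 1).toNat from
            PySem.List.slice_from b (by omega),
          (by omega : (i + 1).toNat = m + 1), List.set_eq_take_append_cons_drop,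
          if_pos (by omega)]
      rw [hA]
      have hfd : PySem.Int.floordiv n 8 = ((N / 8 : Nat) : Int) := by
        rw [PySem.Int.floordiv_eq_ediv_of_pos (by omega)]; omega
      refine ⟨by rw [List.length_set]; exact hlen, ?_, ?_⟩
      · intro c hc
        rcases List.mem_or_eq_of_mem_set hc with hcb | hc1
        · exact hbin c hcb
        · right; exact hc1
      · by_cases hg : 0 ≤ i ∧ i < (PySem.Int.floordiv n 8) * 8
        · -- in processed range: B ORs the bit into byte m / 8
          have hm8 : m < (N / 8) * 8 := by
            obtain ⟨-, hg2⟩ := hg; rw [hfd] at hg2; omega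
          have hj : m / 8 < N / 8 := by omega
          have hfi : PySem.Int.floordiv i 8 = ((m / 8 : Nat) : Int) := by
            rw [PySem.Int.floordiv_eq_ediv_of_pos (by omega)]; omega
          have hmod : (PySem.Int.mod i 8).toNat = m % 8 := by
            rw [PySem.Int.mod_eq_emod_of_pos (by omega)]; omega
          have hchlen : (chunkOf b (m / 8)).length = 8 :=
            length_chunkOf b (m / 8) (by rw [hlen]; omega)
          have hget : vals.getD (m / 8) 0 = ((bval (chunkOf b (m / 8)) : Nat) : Int) := by
            rw [hvals, List.getD_eq_getElem?_getD, List.getElem?_map, List.getElem?_range hj]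
            rfl
          have hsh : ((1 : Int) <<< (PySem.Int.mod i 8).toNat) = (((2 ^ (m % 8) : Nat)) : Int) := by
            rw [hmod, Int.shiftLeft_eq]; push_cast; ring
          rw [if_pos hg, hfi, PySem.List.pySetD_natCast, PySem.List.pyGetD_natCast, hget, hsh,
            PySem.Int.bor_natCast, bval_set _ _ (by omega), hvals]
          apply List.ext_getElem
          · simp
          · intro t h1 h2
            have htK : t < N / 8 := by simpa using h2
            simp only [List.getElem_set, List.getElem_map, List.getElem_range]
            rw [chunkOf_set]
            split_ifs with ht hc2 hc2
            · subst ht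
              rw [(by omega : m - 8 * (m / 8) = m % 8)]
            · omega
            · omega
            · rfl
        · -- index beyond the processed bytes: the output bytes are unchanged on both sides
          have hm8 : ¬ m < (N / 8) * 8 := by
            rw [hfd] at hg; omega
          rw [if_neg hg, hvals]
          apply List.map_congr_left
          intro j hj
          have hjK : j < N / 8 := by simpa using hj
          rw [chunkOf_set, if_neg (by omega)]

theorem fold_pres (n : Int) (l : List (String × String)) (b : List Char) (vals : List Int)
    (hl : ∀ p ∈ l, p.2 = "ON" →
      (PySem.Int.ofStr? p.1).any (fun i => decide (0 ≤ i ∧ i < n)) = true)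
    (h : EncInv n.toNat b vals) :
    EncInv n.toNat
      (l.foldl (fun b p =>
        if p.2 == "ON" then
          match PySem.Int.ofStr? p.1 with
          | some index =>
              PySem.List.slice b none (some index) ++ '1' :: PySem.List.slice b (some (index + 1)) none
          | none => b
        else b) b)
      (l.foldl (fun vals p =>
        if p.2 == "ON" then
          match PySem.Int.ofStr? p.1 with
          | some idx =>
              if 0 ≤ idx ∧ idx < (PySem.Int.floordiv n 8) * 8 then
                PySem.List.pySetD vals (PySem.Int.floordiv idx 8)
                  (PySem.Int.bor (PySem.List.pyGetD vals (PySem.Int.floordiv idx 8) 0)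
                    ((1 : Int) <<< (PySem.Int.mod idx 8).toNat))
              else vals
          | none => vals
        else vals) vals) := by
  induction l generalizing b vals with
  | nil => exact h
  | cons p l ih =>
    exact ih _ _ (fun q hq => hl q (List.mem_cons_of_mem p hq))
      (step_pres n p b vals (hl p (by simp)) h)

-- with the invariant, A's output loop over the bit string equals B's formatting of vals
set_option maxHeartbeats 2000000 in
theorem out_eq (N : Nat) (X : List Char) (vals : List Int) (h : EncInv N X vals) :
    (PySem.List.pyRange 0 (PySem.Int.floordiv (PySem.List.len X) 8) 1).foldl (fun r x =>
      r ++ PySem.Chars.zfill (PySem.Chars.upper (PySem.List.slice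
        (pyHex ((PySem.Int.ofCharsBase?
          ((PySem.List.slice? (PySem.List.slice X (some (x * 8)) (some (x * 8 + 8)))
            none none (-1)).getD []) 2).getD 0))
        (some 2) none)) 2) []
    = (vals.map fmt02X).flatten := by
  obtain ⟨hlen, hbin, hvals⟩ := h
  have hfdN : PySem.Int.floordiv ((N : Nat) : Int) 8 = ((N / 8 : Nat) : Int) := by
    rw [PySem.Int.floordiv_eq_ediv_of_pos (by omega)]; omega
  rw [PySem.List.len_eq, hlen, hfdN, PySem.List.pyRange_zero_nat, List.foldl_map,
    PySem.List.foldl_append_eq_flatMap, List.nil_append, hvals, List.map_map,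
    List.flatMap_def]
  refine congrArg List.flatten (List.map_congr_left ?_)
  intro j hj
  have hjK : j < N / 8 := by simpa using hj
  have h8j : 8 * j + 8 ≤ N := by omega
  dsimp only [Function.comp]
  have hc1 : PySem.List.slice X (some ((j : Int) * 8))
      (some ((j : Int) * 8 + 8)) = chunkOf X j := by
    rw [(by push_cast; ring : ((j : Int) * 8) = ((j * 8 : Nat) : Int)),
      (by push_cast; ring : (((j * 8 : Nat) : Int) + 8) = ((j * 8 : Nat) : Int) + ((8 : Nat) : Int)),
      PySem.List.slice_natCast_add]
    simp [chunkOf, Nat.mul_comm]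
  rw [hc1, PySem.List.slice?_none_none_neg_one, Option.getD_some]
  exact byte_eq _ (length_chunkOf _ j (by omega)) (fun c hc => hbin c (mem_chunkOf _ j c hc))

-- ===== VERDICT (by name: the statement is the Claim_ definition above) =====
set_option maxHeartbeats 1000000 in
theorem encode_prfstate_spec : Claim_equal_encode_prfstate := by
  intro prf n _ hpre
  obtain ⟨hnd, hON⟩ := hpre
  show encode_prfstate prf n = encode_prfstate_alt prf n
  unfold encode_prfstate encode_prfstate_alt
  simp only []
  have hInv0 : EncInv n.toNat (PySem.Chars.zfill [] n)
      (List.replicate (PySem.Int.floordiv n 8).toNat 0) := by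
    rw [zfill_nil]
    refine ⟨by simp, ?_, ?_⟩
    · intro c hc; left; exact List.eq_of_mem_replicate hc
    · have hK : (PySem.Int.floordiv n 8).toNat = n.toNat / 8 := by
        rw [PySem.Int.floordiv_eq_ediv_of_pos (by omega)]; omega
      have hz : ∀ j ∈ List.range (n.toNat / 8),
          ((bval (chunkOf (List.replicate n.toNat '0') j) : Nat) : Int) = 0 := by
        intro j hj
        have hcr : chunkOf (List.replicate n.toNat '0') j
            = List.replicate (min 8 (n.toNat - 8 * j)) '0' := by
          simp [chunkOf, List.drop_replicate, List.take_replicate]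
        rw [hcr, bval_replicate0]
        rfl
      rw [hK, List.map_congr_left hz, List.map_const', List.length_range]
  have key := fold_pres n prf (PySem.Chars.zfill [] n)
    (List.replicate (PySem.Int.floordiv n 8).toNat 0) hON hInv0
  exact congrArg String.ofList (out_eq n.toNat _ _ key)
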